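-- pv_equiv track=rewrite | github.com/0equal2/Python_Programming | programmers/후보키.py | uniqueness
-- ===== SOURCE A (Python) =====
-- def uniqueness(r,c):
--     student=[]
--
--     for x in r:
--         data=[]
--         for i in c:
--             data.append(x[i])
--         student.append(tuple(data))
--
--     if len(set(student))==len(r):
--         return 1
--     else:
--         return 0
-- ===== SOURCE B (Python) =====
-- def uniqueness(r, c):
--     proj = sorted([tuple(x[i] for i in c) for x in r])
--     for a, b in zip(proj, proj[1:]):
--         if a == b:
--             return 0
--     return 1
-- ===== Notes on version B (the rewrite author's own statement) =====
-- stated objective: alternative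
-- what changed: Replaced the set-cardinality uniqueness test by sorting the projected tuples and scanning adjacent pairs for a duplicate, with an early return 0 on the first equal pair.
import Mathlib
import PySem

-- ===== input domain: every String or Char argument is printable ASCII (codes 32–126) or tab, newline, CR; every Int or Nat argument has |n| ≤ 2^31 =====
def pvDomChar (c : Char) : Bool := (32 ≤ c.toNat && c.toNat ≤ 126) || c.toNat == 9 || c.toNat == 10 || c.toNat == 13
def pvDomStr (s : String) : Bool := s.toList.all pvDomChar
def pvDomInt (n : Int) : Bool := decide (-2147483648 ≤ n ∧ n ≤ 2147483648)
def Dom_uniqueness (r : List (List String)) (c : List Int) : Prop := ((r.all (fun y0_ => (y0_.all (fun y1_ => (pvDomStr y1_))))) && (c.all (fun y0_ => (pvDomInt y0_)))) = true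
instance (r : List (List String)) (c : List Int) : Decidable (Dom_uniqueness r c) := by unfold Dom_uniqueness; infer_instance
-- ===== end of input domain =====

-- B replaces A's hash-set cardinality test by sort-then-adjacent-compare (alternative algorithm, same result).

-- ===== PORT A =====
-- student.append(tuple(x[i] for i in c)) for each row; then len(set(student)) == len(r)
def uniqueness (r : List (List String)) (c : List Int) : Int :=
  let student : List (List String) :=
    r.foldl (fun acc x =>
      acc ++ [c.foldl (fun data i => data ++ [PySem.List.pyGetD x i ""]) []]) []
  if (PySem.Set.ofList student).length = r.length then 1 else 0

-- ===== PORT B =====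
-- proj = sorted([tuple(x[i] for i in c) for x in r]); scan adjacent pairs, 0 on first equal pair, else 1
def pvHasAdjDup : List (List String) → Bool
  | a :: b :: t => a == b || pvHasAdjDup (b :: t)
  | _ => false

def uniqueness_alt (r : List (List String)) (c : List Int) : Int :=
  let proj := @PySem.List.sorted (List String) (List String) List.instLinearOrder.toLT
    LinearOrder.toDecidableLT (r.map (fun x => c.map (fun i => PySem.List.pyGetD x i ""))) (fun t => t) false
  if pvHasAdjDup proj then 0 else 1

-- ===== PRECONDITION & SPEC =====
-- Pre_ excludes exactly the inputs where x[i] raises IndexError in A (and in B alike)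
def Pre_uniqueness (r : List (List String)) (c : List Int) : Prop :=
  ∀ x ∈ r, ∀ i ∈ c, PySem.Raise.InRange x.length i
instance (r : List (List String)) (c : List Int) : Decidable (Pre_uniqueness r c) := by
  unfold Pre_uniqueness; infer_instance
def pvWitness_uniqueness : List (List String) × List Int := ([["a", "b"], ["a", "c"]], [0, 1])

def Spec_uniqueness (r : List (List String)) (c : List Int) (out : Int) : Prop := out = uniqueness_alt r c
instance (r : List (List String)) (c : List Int) (out : Int) : Decidable (Spec_uniqueness r c out) := by unfold Spec_uniqueness; infer_instance

-- ===== CLAIM (what is proved, stated in full; the proofs are below) =====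
def Claim_equal_uniqueness : Prop := ∀ (r : List (List String)) (c : List Int), Dom_uniqueness r c → Pre_uniqueness r c → Spec_uniqueness r c (uniqueness r c)

-- ===== LEMMAS AND PROOFS =====

-- set cardinality detects duplicates: len(set(xs)) == len(xs) ↔ xs has no duplicates
theorem pv_ofList_length_iff_nodup {α : Type} [BEq α] [LawfulBEq α] (xs : List α) :
    (PySem.Set.ofList xs).length = xs.length ↔ xs.Nodup := by
  constructor
  · intro h
    induction xs with
    | nil => exact List.nodup_nil
    | cons x t ih =>
      rw [PySem.Set.ofList_cons] at h
      simp only [List.length_cons] at h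
      have hdisc : (PySem.Set.discard (PySem.Set.ofList t) x).length ≤ (PySem.Set.ofList t).length := by
        simp [PySem.Set.discard]
        exact List.length_filter_le _ _
      have hle := PySem.Set.length_ofList_le (xs := t)
      have hlen : (PySem.Set.discard (PySem.Set.ofList t) x).length = t.length := by omega
      have hlen2 : (PySem.Set.ofList t).length = t.length := by omega
      have hnd := ih hlen2
      -- x ∉ t: else discard would shrink strictly
      have hx : x ∉ t := by
        intro hmem
        have hxin : x ∈ PySem.Set.ofList t := (PySem.Set.mem_ofList t x).2 hmem
        have : (PySem.Set.discard (PySem.Set.ofList t) x).length < (PySem.Set.ofList t).length := by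
          simp only [PySem.Set.discard]
          apply List.length_filter_lt_length_iff_exists.2
          exact ⟨x, hxin, by simp⟩
        omega
      exact List.nodup_cons.2 ⟨hx, hnd⟩
  · intro h
    rw [PySem.Set.ofList_eq_self_of_nodup xs h]

-- the adjacent scan finds a duplicate iff the chain of adjacent disequalities fails
theorem pv_hasAdjDup_eq_false_iff (l : List (List String)) :
    pvHasAdjDup l = false ↔ l.IsChain (· ≠ ·) := by
  induction l with
  | nil => simp [pvHasAdjDup]
  | cons a t ih =>
    cases t with
    | nil => simp [pvHasAdjDup]
    | cons b u =>
      simp only [pvHasAdjDup, Bool.or_eq_false_iff, beq_eq_false_iff_ne, List.isChain_cons_cons]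
      exact and_congr Iff.rfl ih

-- on a (≤)-pairwise list, no adjacent duplicates is the same as no duplicates at all
theorem pv_chain_ne_iff_nodup (l : List (List String)) (hs : l.Pairwise (· ≤ ·)) :
    l.IsChain (· ≠ ·) ↔ l.Nodup := by
  constructor
  · intro hc
    have hlt : l.IsChain (· < ·) := by
      have hch : l.IsChain (· ≤ ·) := hs.isChain
      clear hs
      induction l with
      | nil => exact List.IsChain.nil
      | cons a t ih =>
        cases t with
        | nil => exact List.isChain_singleton a
        | cons b u =>
          rw [List.isChain_cons_cons] at hc hch ⊢
          exact ⟨lt_of_le_of_ne hch.1 hc.1, ih hc.2 hch.2⟩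
    have : l.Pairwise (· < ·) := List.isChain_iff_pairwise.1 hlt
    exact this.imp ne_of_lt
  · intro hn
    exact hn.isChain

-- A's appended student list is the map of projections
theorem pv_student_eq (r : List (List String)) (c : List Int) :
    r.foldl (fun acc x =>
      acc ++ [c.foldl (fun data i => data ++ [PySem.List.pyGetD x i ""]) []]) []
    = r.map (fun x => c.map (fun i => PySem.List.pyGetD x i "")) := by
  rw [PySem.List.foldl_append_singleton_eq_map]
  simp only [List.nil_append]
  apply List.map_congr_left
  intro x _
  rw [PySem.List.foldl_append_singleton_eq_map]
  simp

-- ===== VERDICT (by name: the statement is the Claim_ definition above) =====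
theorem uniqueness_spec : Claim_equal_uniqueness := by
  intro r c _ _
  unfold Spec_uniqueness uniqueness uniqueness_alt
  rw [pv_student_eq]
  set s := r.map (fun x => c.map (fun i => PySem.List.pyGetD x i "")) with hs
  have hlen : s.length = r.length := by simp [hs]
  set t := @PySem.List.sorted (List String) (List String) List.instLinearOrder.toLT
    LinearOrder.toDecidableLT s (fun t => t) false with ht
  have hperm : t.Perm s := by
    rw [ht]
    exact @PySem.List.sorted_perm (List String) (List String) List.instLinearOrder.toLT
      LinearOrder.toDecidableLT s (fun t => t) false
  have hpw : t.Pairwise (· ≤ ·) := by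
    rw [ht]; exact @PySem.List.sorted_pairwise (List String) (List String) List.instLinearOrder s (fun t => t)
  have h1 : (PySem.Set.ofList s).length = r.length ↔ s.Nodup := by
    rw [← hlen]; exact pv_ofList_length_iff_nodup s
  have h2 : pvHasAdjDup t = false ↔ s.Nodup := by
    rw [pv_hasAdjDup_eq_false_iff, pv_chain_ne_iff_nodup t hpw, hperm.nodup_iff]
  by_cases hnd : s.Nodup
  · rw [if_pos (h1.2 hnd), if_neg (by simp [h2.2 hnd])]
  · rw [if_neg (fun h => hnd (h1.1 h)), if_pos]
    cases hb : pvHasAdjDup t with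
    | false => exact absurd (h2.1 hb) hnd
    | true => rfl
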